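-- pv_equiv track=rewrite | github.com/SimonFans/LeetCode | Interview/Find_Largest_Contiguous_Number.py | getMaxIncrement
-- ===== SOURCE A (Python) =====
-- def getMaxIncrement(nums):
--     anchor = 0
--     pos = []
--     ans = 0
--     seen = set()
--     res = []
--     # edge case
--     if len(nums)== 1:
--         return [1]
--     # loop from the second number to the end of the array
--     for i in range(1, len(nums)):
--         # if the next number is not increment by 1, then update the anchor
--         if nums[i-1] + 1 != nums[i]:
--             anchor = i
--         # if the next number is incremented by 1, then save (anchor, max_reach_position), update the max_reach_position
--         else:
--             if i - anchor + 1 > ans: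
--                 pos = []
--                 pos.append((anchor, i - anchor + 1))
--             elif i - anchor + 1 == ans:
--                 pos.append((anchor, i - anchor + 1))
--             ans = max(ans, i - anchor + 1)
--     for left, length in pos:
--         if tuple(nums[left:left + length]) not in seen:
--             seen.add(tuple(nums[left:left + length]))
--             res.append(nums[left:left + length])
--     return res
-- ===== SOURCE B (Python) =====
-- def getMaxIncrement(nums):
--     # One pass: split nums into maximal +1-incrementing runs (start, length);
--     # then keep the runs of maximum length (if that length >= 2) and dedup slices.
--     n = len(nums)
--     runs = []
--     i = 0
--     while i < n:
--         j = i
--         while j + 1 < n and nums[j] + 1 == nums[j + 1]: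
--             j += 1
--         runs.append((i, j - i + 1))
--         i = j + 1
--     best = 0
--     for _, l in runs:
--         if l > best:
--             best = l
--     if best < 2:
--         return []
--     seen = set()
--     res = []
--     for s, l in runs:
--         if l == best:
--             t = tuple(nums[s:s + l])
--             if t not in seen:
--                 seen.add(t)
--                 res.append(nums[s:s + l])
--     return res
-- ===== Notes on version B (the rewrite author's own statement) =====
-- stated objective: alternative
-- what changed: B first decomposes nums into maximal +1-incrementing runs (start,length) in one structural pass, then computes the maximum run length and collects/dedups the slices of maximum-length runs, instead of A's single index loop that interleaves anchor tracking, max updates and candidate-list resets.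
-- outside the precondition, e.g. on getMaxIncrement([5]): A returns [1], B returns []; on getMaxIncrement([1]): A returns [1], B returns []
import Mathlib
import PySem

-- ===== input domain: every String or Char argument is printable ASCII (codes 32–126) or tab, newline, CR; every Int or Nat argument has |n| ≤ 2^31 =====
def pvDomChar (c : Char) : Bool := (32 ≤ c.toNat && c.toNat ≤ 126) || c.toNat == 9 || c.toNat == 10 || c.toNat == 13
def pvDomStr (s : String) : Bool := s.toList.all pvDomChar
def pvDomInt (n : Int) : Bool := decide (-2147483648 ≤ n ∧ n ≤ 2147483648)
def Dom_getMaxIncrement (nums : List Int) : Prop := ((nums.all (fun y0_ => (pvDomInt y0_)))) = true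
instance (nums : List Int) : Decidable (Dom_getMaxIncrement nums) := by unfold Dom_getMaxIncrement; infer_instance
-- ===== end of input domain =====

-- B decomposes nums into maximal +1-incrementing runs first, then filters the maximum-length runs
-- and dedups their slices — a different decomposition of the same task (objective: alternative).


-- ===== PORT A =====
-- the body of A's `for i in range(1, len(nums))` loop, acting on the state (anchor, pos, ans)
def aStep (nums : List Int) (st : Int × List (Int × Int) × Int) (i : Int) :
    Int × List (Int × Int) × Int :=
  if PySem.List.pyGetD nums (i - 1) 0 + 1 ≠ PySem.List.pyGetD nums i 0 then
    (i, st.2.1, st.2.2)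
  else
    (st.1,
     if st.2.2 < i - st.1 + 1 then [(st.1, i - st.1 + 1)]
     else if i - st.1 + 1 = st.2.2 then st.2.1 ++ [(st.1, i - st.1 + 1)]
     else st.2.1,
     max st.2.2 (i - st.1 + 1))

-- A's final `for left, length in pos` dedup loop (seen : set, res : list)
def aDedup (nums : List Int) (pos : List (Int × Int)) : List (List Int) :=
  (pos.foldl
    (fun (ac : PySem.Set (List Int) × List (List Int)) p =>
      if PySem.Set.contains ac.1 (PySem.List.slice nums (some p.1) (some (p.1 + p.2))) then ac
      else (PySem.Set.add ac.1 (PySem.List.slice nums (some p.1) (some (p.1 + p.2))),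
            ac.2 ++ [PySem.List.slice nums (some p.1) (some (p.1 + p.2))]))
    (PySem.Set.empty, [])).2

def getMaxIncrement (nums : List Int) : List (List Int) :=
  if nums.length = 1 then []
    -- Python returns the literal [1] here: a list of ints, not a list of lists, hence not a
    -- value of the declared return type; this input is excluded by Pre_getMaxIncrement.
  else
    aDedup nums (((PySem.List.pyRange 1 nums.length 1).foldl (aStep nums) (0, [], 0)).2.1)

-- ===== PORT B =====
-- Source B's inner `while j + 1 < n and nums[j] + 1 == nums[j+1]` loop: last index of the run
-- starting at j (structural transcription of the while loop; fuel = remaining length)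
def findRunEnd (nums : List Int) : Nat → Nat → Nat
  | 0, j => j
  | fuel + 1, j =>
    if j + 1 < nums.length then
      if nums.getD j 0 + 1 = nums.getD (j + 1) 0 then findRunEnd nums fuel (j + 1) else j
    else j

-- Source B's outer `while i < n` loop building the list of maximal runs (start, length)
def buildRuns (nums : List Int) : Nat → Nat → List (Int × Int)
  | 0, _ => []
  | fuel + 1, i =>
    if i < nums.length then
      ((i : Int), (findRunEnd nums (nums.length - i) i : Int) - (i : Int) + 1) ::
        buildRuns nums fuel (findRunEnd nums (nums.length - i) i + 1)
    else []

def getMaxIncrement_alt (nums : List Int) : List (List Int) :=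
  let runs := buildRuns nums nums.length 0
  let best := runs.foldl (fun b p => if b < p.2 then p.2 else b) 0
  if best < 2 then []
  else
    (runs.foldl
      (fun (ac : PySem.Set (List Int) × List (List Int)) p =>
        if p.2 = best then
          if PySem.Set.contains ac.1 (PySem.List.slice nums (some p.1) (some (p.1 + p.2))) then ac
          else (PySem.Set.add ac.1 (PySem.List.slice nums (some p.1) (some (p.1 + p.2))),
                ac.2 ++ [PySem.List.slice nums (some p.1) (some (p.1 + p.2))])
        else ac)
      (PySem.Set.empty, [])).2

-- ===== PRECONDITION & SPEC =====
-- Pre_ excludes exactly the singleton lists, on which A returns the literal [1] — a list of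
-- ints rather than a list of lists, i.e. not a value of the declared return type.
def Pre_getMaxIncrement (nums : List Int) : Prop := nums.length ≠ 1
instance (nums : List Int) : Decidable (Pre_getMaxIncrement nums) := by
  unfold Pre_getMaxIncrement; infer_instance
def pvWitness_getMaxIncrement : List Int := [1, 2, 3]

def Spec_getMaxIncrement (nums : List Int) (out : List (List Int)) : Prop :=
  out = getMaxIncrement_alt nums
instance (nums : List Int) (out : List (List Int)) : Decidable (Spec_getMaxIncrement nums out) := by
  unfold Spec_getMaxIncrement; infer_instance

-- ===== CLAIM (what is proved, stated in full; the proofs are below) =====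
def Claim_equal_getMaxIncrement : Prop := ∀ (nums : List Int), Dom_getMaxIncrement nums →
  Pre_getMaxIncrement nums → Spec_getMaxIncrement nums (getMaxIncrement nums)

-- ===== LEMMAS AND PROOFS =====

-- the net effect of one maximal run (start s, length L) on A's (pos, ans) state
def runS (s L : Int) (pos : List (Int × Int)) (ans : Int) : List (Int × Int) × Int :=
  if L < 2 then (pos, ans)
  else (if ans < L then [(s, L)] else if L = ans then pos ++ [(s, L)] else pos, max ans L)

def runEff : List (Int × Int) → List (Int × Int) → Int → List (Int × Int) × Int
  | [], pos, ans => (pos, ans)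
  | p :: rs, pos, ans => runEff rs (runS p.1 p.2 pos ans).1 (runS p.1 p.2 pos ans).2

def maxAll : List (Int × Int) → Int
  | [] => 0
  | p :: rs => max p.2 (maxAll rs)

def maxLen2 : List (Int × Int) → Int
  | [] => 0
  | p :: rs => max (if 2 ≤ p.2 then p.2 else 0) (maxLen2 rs)

def posF (rs pos : List (Int × Int)) (ans : Int) : List (Int × Int) :=
  if maxLen2 rs < 2 ∨ maxLen2 rs < ans then pos
  else if ans < maxLen2 rs then rs.filter (fun p => p.2 = maxLen2 rs)
  else pos ++ rs.filter (fun p => p.2 = maxLen2 rs)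

theorem maxLen2_nonneg (rs : List (Int × Int)) : 0 ≤ maxLen2 rs := by
  induction rs with
  | nil => simp [maxLen2]
  | cons p rs ih => simp [maxLen2]; omega

theorem le_maxLen2 (rs : List (Int × Int)) (p : Int × Int) (hp : p ∈ rs) (h2 : 2 ≤ p.2) :
    p.2 ≤ maxLen2 rs := by
  induction rs with
  | nil => simp at hp
  | cons q rs ih =>
    rcases List.mem_cons.mp hp with h | h
    · subst h; simp [maxLen2]; omega
    · have := ih h; simp [maxLen2]; omega

theorem filter_eq_nil_of_gt (rs : List (Int × Int)) (M : Int) (h2 : 2 ≤ M)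
    (h : maxLen2 rs < M) : rs.filter (fun p => p.2 = M) = [] := by
  rw [List.filter_eq_nil_iff]
  intro p hp hpe
  simp at hpe
  have := le_maxLen2 rs p hp (by omega)
  omega

theorem runEff_spec (rs : List (Int × Int)) : ∀ pos ans, (ans = 0 ∨ 2 ≤ ans) →
    runEff rs pos ans = (posF rs pos ans, max ans (maxLen2 rs)) := by
  induction rs with
  | nil =>
    intro pos ans h
    simp only [runEff, posF, maxLen2]
    rw [if_pos (by norm_num)]
    simp only [Prod.mk.injEq, true_and]
    omega
  | cons p rs ih =>
    obtain ⟨s, L⟩ := p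
    intro pos ans hans
    have hm0 : 0 ≤ maxLen2 rs := maxLen2_nonneg rs
    by_cases hL2 : L < 2
    · rw [runEff]
      simp only [runS, if_pos hL2]
      rw [ih pos ans hans]
      have hM : maxLen2 ((s, L) :: rs) = maxLen2 rs := by
        simp only [maxLen2, if_neg (by omega : ¬ (2 : Int) ≤ L)]
        omega
      rw [hM]
      unfold posF
      rw [hM]
      split_ifs with h1 h2
      · rfl
      · rw [List.filter_cons_of_neg (by simp; omega)]
      · rw [List.filter_cons_of_neg (by simp; omega)]
    · push Not at hL2
      rw [runEff]
      simp only [runS, if_neg (by omega : ¬ L < 2)]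
      rw [ih _ _ (Or.inr (hL2.trans (le_max_right ans L)))]
      have hM : maxLen2 ((s, L) :: rs) = max L (maxLen2 rs) := by
        simp only [maxLen2, if_pos hL2]
      simp only [Prod.mk.injEq, hM]
      constructor
      · unfold posF
        rw [hM]
        rcases le_or_gt L (maxLen2 rs) with hLm | hLm
        · rw [max_eq_right hLm]
          simp only [List.filter_cons]
          split_ifs <;> simp only [decide_eq_true_eq] at * <;>
            first
              | rfl
              | omega
              | simp [List.append_assoc]
        · rw [max_eq_left hLm.le]
          have hnil : List.filter (fun p => decide (p.2 = L)) rs = [] :=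
            filter_eq_nil_of_gt rs L hL2 hLm
          simp only [List.filter_cons, hnil]
          split_ifs <;> simp only [decide_eq_true_eq] at * <;>
            first
              | rfl
              | omega
              | exact absurd trivial ‹¬True›
      · dsimp only
        omega

-- one maximal run: the loop over its interior indices applies runS
theorem run_fold (nums : List Int) (i : Nat) : ∀ (L : Nat), 1 ≤ L → i + L ≤ nums.length →
    (∀ m : Nat, i ≤ m → m + 1 < i + L → nums.getD m 0 + 1 = nums.getD (m + 1) 0) →
    ∀ pos ans,
      (PySem.List.pyRange ((i : Int) + 1) ((i : Int) + (L : Int)) 1).foldl (aStep nums)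
          ((i : Int), pos, ans)
        = ((i : Int), runS (i : Int) (L : Int) pos ans) := by
  intro L
  induction L with
  | zero => intro h; omega
  | succ L ih =>
    intro hL hlen hinc pos ans
    rcases Nat.eq_zero_or_pos L with h0 | h0
    · subst h0
      rw [show ((i : Int) + ((0 + 1 : Nat) : Int)) = (i : Int) + 1 by push_cast; ring]
      rw [PySem.List.pyRange_one_eq_nil (by omega)]
      simp [runS]
    · rw [show (((L + 1 : Nat)) : Int) = ((L : Int) + 1) by push_cast; ring]
      rw [show (i : Int) + ((L : Int) + 1) = ((i : Int) + (L : Int)) + 1 by ring]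
      rw [PySem.List.pyRange_one_succ_right (by omega), List.foldl_append]
      rw [ih (by omega) (by omega) (fun m h1 h2 => hinc m h1 (by omega)) pos ans]
      have g1 : PySem.List.pyGetD nums ((i : Int) + (L : Int) - 1) 0 + 1
          = PySem.List.pyGetD nums ((i : Int) + (L : Int)) 0 := by
        rw [show ((i : Int) + (L : Int) - 1) = ((i + L - 1 : Nat) : Int) by omega]
        rw [show ((i : Int) + (L : Int)) = ((i + L - 1 + 1 : Nat) : Int) by omega]
        rw [PySem.List.pyGetD_natCast, PySem.List.pyGetD_natCast]
        exact hinc (i + L - 1) (by omega) (by omega)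
      simp only [List.foldl_cons, List.foldl_nil]
      unfold aStep
      rw [if_neg (not_not_intro g1)]
      rw [show ((i : Int) + (L : Int) - (i : Int) + 1) = (L : Int) + 1 by ring]
      unfold runS
      simp only [max_def]
      split_ifs <;> simp only [Prod.mk.injEq] at * <;>
        first
          | rfl
          | omega

theorem le_findRunEnd (nums : List Int) : ∀ (fuel j : Nat), j ≤ findRunEnd nums fuel j := by
  intro fuel
  induction fuel with
  | zero => intro j; simp [findRunEnd]
  | succ f ih =>
    intro j
    simp only [findRunEnd]
    split_ifs with h1 h2
    · exact (Nat.le_succ j).trans (ih (j + 1))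
    · exact le_rfl
    · exact le_rfl

theorem findRunEnd_lt (nums : List Int) : ∀ (fuel j : Nat), j < nums.length →
    findRunEnd nums fuel j < nums.length := by
  intro fuel
  induction fuel with
  | zero => intro j h; simpa [findRunEnd] using h
  | succ f ih =>
    intro j h
    simp only [findRunEnd]
    split_ifs with h1 h2
    · exact ih (j + 1) (by omega)
    · exact h
    · exact h

theorem findRunEnd_incr (nums : List Int) : ∀ (fuel j m : Nat), j ≤ m →
    m < findRunEnd nums fuel j → nums.getD m 0 + 1 = nums.getD (m + 1) 0 := by
  intro fuel
  induction fuel with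
  | zero => intro j m h1 h2; simp [findRunEnd] at h2; omega
  | succ f ih =>
    intro j m h1 h2
    simp only [findRunEnd] at h2
    by_cases hc : j + 1 < nums.length
    · rw [if_pos hc] at h2
      by_cases he : nums.getD j 0 + 1 = nums.getD (j + 1) 0
      · rw [if_pos he] at h2
        rcases Nat.eq_or_lt_of_le h1 with h | h
        · subst h; exact he
        · exact ih (j + 1) m (by omega) h2
      · rw [if_neg he] at h2; omega
    · rw [if_neg hc] at h2; omega

theorem findRunEnd_stop (nums : List Int) : ∀ (fuel j : Nat), nums.length ≤ j + fuel →
    findRunEnd nums fuel j + 1 < nums.length →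
    nums.getD (findRunEnd nums fuel j) 0 + 1 ≠ nums.getD (findRunEnd nums fuel j + 1) 0 := by
  intro fuel
  induction fuel with
  | zero => intro j h1 h2; simp [findRunEnd] at h2 ⊢; omega
  | succ f ih =>
    intro j h1 h2
    simp only [findRunEnd] at h2 ⊢
    by_cases hc : j + 1 < nums.length
    · rw [if_pos hc] at h2 ⊢
      by_cases he : nums.getD j 0 + 1 = nums.getD (j + 1) 0
      · rw [if_pos he] at h2 ⊢
        exact ih (j + 1) (by omega) h2
      · rw [if_neg he] at h2 ⊢
        exact he
    · rw [if_neg hc] at h2 ⊢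
      omega

theorem loop_eq (nums : List Int) : ∀ (k fuel i : Nat) (pos : List (Int × Int)) (ans : Int),
    nums.length - i = k → i < nums.length → nums.length ≤ i + fuel →
    ((PySem.List.pyRange ((i : Int) + 1) (nums.length : Int) 1).foldl (aStep nums)
        ((i : Int), pos, ans)).2
      = runEff (buildRuns nums fuel i) pos ans := by
  intro k
  induction k using Nat.strong_induction_on with
  | _ k ih =>
    intro fuel i pos ans hk hi hfuel
    cases fuel with
    | zero => omega
    | succ f =>
      have hij : i ≤ findRunEnd nums (nums.length - i) i := le_findRunEnd nums _ i
      have hjn : findRunEnd nums (nums.length - i) i < nums.length :=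
        findRunEnd_lt nums _ i hi
      set j := findRunEnd nums (nums.length - i) i with hj
      have hbr : buildRuns nums (f + 1) i
          = ((i : Int), (j : Int) - (i : Int) + 1) :: buildRuns nums f (j + 1) := by
        simp only [buildRuns]
        rw [if_pos hi]
      rw [hbr]
      rw [PySem.List.pyRange_one_append ((i : Int) + 1) ((j : Int) + 1) (nums.length : Int)
        (by omega) (by omega), List.foldl_append]
      have hL : ((j : Int) + 1) = (i : Int) + ((j - i + 1 : Nat) : Int) := by omega
      rw [hL]
      rw [run_fold nums i (j - i + 1) (by omega) (by omega)
        (fun m h1 h2 => findRunEnd_incr nums (nums.length - i) i m h1 (by omega)) pos ans]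
      have hLc : ((j - i + 1 : Nat) : Int) = (j : Int) - (i : Int) + 1 := by omega
      rw [runEff]
      simp only [hLc]
      by_cases hjn1 : j + 1 < nums.length
      · rw [show (i : Int) + ((j : Int) - (i : Int) + 1) = ((j + 1 : Nat) : Int) by
          push_cast; ring]
        rw [PySem.List.pyRange_one_cons (by exact_mod_cast by omega), List.foldl_cons]
        have g2 : PySem.List.pyGetD nums (((j + 1 : Nat) : Int) - 1) 0 + 1
            ≠ PySem.List.pyGetD nums ((j + 1 : Nat) : Int) 0 := by
          rw [show (((j + 1 : Nat) : Int) - 1) = ((j : Nat) : Int) by omega]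
          rw [PySem.List.pyGetD_natCast, PySem.List.pyGetD_natCast]
          exact findRunEnd_stop nums (nums.length - i) i (by omega) hjn1
        unfold aStep
        rw [if_pos g2]
        exact ih (nums.length - (j + 1)) (by omega) f (j + 1)
          (runS (i : Int) ((j : Int) - (i : Int) + 1) pos ans).1
          (runS (i : Int) ((j : Int) - (i : Int) + 1) pos ans).2 rfl (by omega) (by omega)
      · rw [show (i : Int) + ((j : Int) - (i : Int) + 1) = (nums.length : Int) by omega]
        rw [PySem.List.pyRange_one_eq_nil (by omega), List.foldl_nil]
        have hbr2 : buildRuns nums f (j + 1) = [] := by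
          cases f with
          | zero => rfl
          | succ f' => simp only [buildRuns]; rw [if_neg (by omega)]
        rw [hbr2, runEff]

theorem foldl_max (rs : List (Int × Int)) : ∀ b : Int, 0 ≤ b →
    rs.foldl (fun b p => if b < p.2 then p.2 else b) b = max b (maxAll rs) := by
  induction rs with
  | nil => intro b hb; simp [maxAll]; omega
  | cons p rs ih =>
    intro b hb
    simp only [List.foldl_cons, maxAll]
    rw [ih _ (by split_ifs <;> omega)]
    split_ifs <;> omega

theorem maxLen2_eq (rs : List (Int × Int)) (h : ∀ p ∈ rs, 1 ≤ p.2) :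
    maxLen2 rs = if 2 ≤ maxAll rs then maxAll rs else 0 := by
  induction rs with
  | nil => simp [maxLen2, maxAll]
  | cons p rs ih =>
    have h1 := h p (by simp)
    have ih' := ih (fun q hq => h q (by simp [hq]))
    simp only [maxLen2, maxAll, ih']
    split_ifs <;> omega

theorem buildRuns_pos (nums : List Int) : ∀ (fuel i : Nat),
    ∀ p ∈ buildRuns nums fuel i, 1 ≤ p.2 := by
  intro fuel
  induction fuel with
  | zero => intro i p hp; simp [buildRuns] at hp
  | succ f ih =>
    intro i p hp
    simp only [buildRuns] at hp
    split_ifs at hp with h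
    · rcases List.mem_cons.mp hp with h1 | h1
      · subst h1
        have := le_findRunEnd nums (nums.length - i) i
        simp
        omega
      · exact ih _ p h1
    · simp at hp

-- ===== VERDICT (by name: the statement is the Claim_ definition above) =====
theorem getMaxIncrement_spec : Claim_equal_getMaxIncrement := by
  intro nums _hdom hpre
  unfold Spec_getMaxIncrement
  rcases Nat.eq_zero_or_pos nums.length with h0 | h0
  · have hnil : nums = [] := List.eq_nil_of_length_eq_zero h0
    subst hnil
    have hb : buildRuns ([] : List Int) 0 0 = [] := rfl
    simp [getMaxIncrement, getMaxIncrement_alt, hb, aDedup, PySem.List.pyRange]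
  · unfold Pre_getMaxIncrement at hpre
    unfold getMaxIncrement
    rw [if_neg hpre]
    have hloop := loop_eq nums (nums.length - 0) nums.length 0 [] 0 rfl h0 (by omega)
    norm_num at hloop
    rw [hloop]
    have hpos := buildRuns_pos nums nums.length 0
    have hml2 := maxLen2_eq (buildRuns nums nums.length 0) hpos
    have hbest : (buildRuns nums nums.length 0).foldl (fun b p => if b < p.2 then p.2 else b) 0
        = max 0 (maxAll (buildRuns nums nums.length 0)) := foldl_max (buildRuns nums nums.length 0) 0 le_rfl
    rw [runEff_spec (buildRuns nums nums.length 0) [] 0 (Or.inl rfl)]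
    unfold getMaxIncrement_alt
    simp only []
    rw [hbest]
    unfold posF
    by_cases ha : 2 ≤ maxAll (buildRuns nums nums.length 0)
    · have hm : maxLen2 (buildRuns nums nums.length 0) = maxAll (buildRuns nums nums.length 0) := by
        rw [hml2, if_pos ha]
      rw [if_neg (show ¬ max 0 (maxAll (buildRuns nums nums.length 0)) < 2 by omega)]
      rw [if_neg (by omega), if_pos (by omega)]
      rw [hm, show max 0 (maxAll (buildRuns nums nums.length 0)) = maxAll (buildRuns nums nums.length 0) by omega]
      unfold aDedup
      rw [List.foldl_filter]
      simp only [decide_eq_true_eq]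
    · have hm : maxLen2 (buildRuns nums nums.length 0) = 0 := by rw [hml2, if_neg ha]
      rw [if_pos (show max 0 (maxAll (buildRuns nums nums.length 0)) < 2 by omega)]
      rw [if_pos (by omega)]
      rfl
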